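-- pv_equiv track=rewrite | github.com/Syuko4omi/textchecker | src/module_wordy/wordy_funcs.py | find_wordy_expression
-- ===== SOURCE A (Python) =====
-- def find_wordy_expression(
--     one_sentence: str, wordy_expression_dict: dict[str, list[str]]
-- ) -> list[str]:
--     # 文章中から冗長表現を抜き出す
--     wordy_parts = []
--     for key in wordy_expression_dict.keys():
--         if len(one_sentence.split(key)) > 1:  # 冗長表現が文章の中にあった場合
--             splitted_parts = one_sentence.split(key)  # その冗長表現を境界にして文章を分ける
--             for idx in range(len(splitted_parts)):  # 文中に登場する順序を保ったまま、冗長表現を格納する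
--                 wordy_parts.extend(
--                     find_wordy_expression(splitted_parts[idx], wordy_expression_dict)
--                 )
--                 if idx != len(splitted_parts) - 1:
--                     wordy_parts.append(key)
--             break
--     return wordy_parts
-- ===== SOURCE B (Python) =====
-- def find_wordy_expression(
--     one_sentence: str, wordy_expression_dict: dict[str, list[str]]
-- ) -> list[str]:
--     # iterative worklist: pop segments/emitted keys from an explicit stack,
--     # splitting each segment at the first occurrence of the first present key
--     out = []
--     stack = [("seg", one_sentence)]
--     while stack:
--         tag, val = stack.pop()
--         if tag == "key":
--             out.append(val)
--             continue
--         for key in wordy_expression_dict: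
--             if key in val:
--                 left, _, right = val.partition(key)
--                 stack.append(("seg", right))
--                 stack.append(("key", key))
--                 stack.append(("seg", left))
--                 break
--     return out
-- ===== Notes on version B (the rewrite author's own statement) =====
-- stated objective: alternative
-- what changed: A recursively splits the sentence on every occurrence of the first present key and intersperses the key between the recursively processed fragments; B is iterative: it keeps an explicit worklist stack of segment/key tokens, pops a segment, partitions it at the first occurrence of the first present key, and pushes left, key, right back, appending keys to the output as they are popped.
-- outside the precondition, e.g. on find_wordy_expression('ab', {'': []}): A raises ValueError, B raises ValueError
import Mathlib
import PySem

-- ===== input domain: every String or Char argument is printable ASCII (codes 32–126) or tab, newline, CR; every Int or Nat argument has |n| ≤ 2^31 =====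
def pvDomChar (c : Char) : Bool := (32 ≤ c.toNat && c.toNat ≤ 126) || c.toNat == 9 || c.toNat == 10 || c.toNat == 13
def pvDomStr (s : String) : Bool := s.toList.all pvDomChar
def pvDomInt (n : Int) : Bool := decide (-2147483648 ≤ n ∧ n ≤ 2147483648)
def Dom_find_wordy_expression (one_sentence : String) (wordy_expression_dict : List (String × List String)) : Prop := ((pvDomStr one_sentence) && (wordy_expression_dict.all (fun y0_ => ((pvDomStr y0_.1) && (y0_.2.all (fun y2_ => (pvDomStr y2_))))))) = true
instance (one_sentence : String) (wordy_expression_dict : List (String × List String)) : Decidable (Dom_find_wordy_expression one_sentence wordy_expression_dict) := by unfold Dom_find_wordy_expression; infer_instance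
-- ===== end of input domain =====

-- B replaces A's recursive split-on-all-occurrences with an iterative explicit-stack
-- worklist over segment/key tokens; objective: alternative algorithm, same return value.


-- ===== PORT A =====
-- port of A: loop over the dict keys; on the first key whose split has more than
-- one part, recurse on every fragment and intersperse the key between them (the
-- indexed inner loop of A is exactly this interspersing).  The recursion is fueled
-- by the sentence length (each fragment is strictly shorter, so fuel never runs
-- out); `none` from split? (empty key: Python raises ValueError) is excluded by
-- Pre_ below.
def pvLoopA (F : List Char → List String) (keys : List (String × List String))
    (s : List Char) : List String :=
  match keys with
  | [] => []
  | (k, _) :: rest =>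
    match PySem.Chars.split? s k.toList with
    | none => []
    | some parts =>
      if 1 < parts.length then
        List.intercalate [k] (parts.map F)
      else
        pvLoopA F rest s

def pvFweA (d : List (String × List String)) (fuel : Nat) (s : List Char) : List String :=
  match fuel with
  | 0 => []
  | fuel + 1 => pvLoopA (fun p => pvFweA d fuel p) d s

def find_wordy_expression (one_sentence : String) (wordy_expression_dict : List (String × List String)) : List String :=
  pvFweA wordy_expression_dict (one_sentence.toList.length + 1) one_sentence.toList

-- ===== PORT B =====
-- port of B: an explicit worklist stack whose items are either a still-unprocessed
-- segment (Sum.inl) or a key ready to be emitted (Sum.inr).  Each step pops the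
-- top item: a key is appended to the output; a segment is scanned for the first
-- present dict key (pvFirstKey) and, if one is found, partitioned at its first
-- occurrence (take/drop at Chars.find), pushing left segment, key token, right
-- segment.  Fueled by 4*|s|+3 steps, which the proofs show is always enough.
-- The empty-key branch (Python: ValueError from str.partition) is excluded by
-- Pre_ below.
def pvFirstKey (keys : List (String × List String)) (s : List Char) : Option String :=
  match keys with
  | [] => none
  | (k, _) :: rest => if PySem.Chars.isIn k.toList s then some k else pvFirstKey rest s

def pvStep (d : List (String × List String)) :
    Nat → List String → List (List Char ⊕ String) → List String
  | _, out, [] => out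
  | 0, out, _ :: _ => out
  | fuel + 1, out, Sum.inr k :: rest => pvStep d fuel (out ++ [k]) rest
  | fuel + 1, out, Sum.inl seg :: rest =>
    match pvFirstKey d seg with
    | none => pvStep d fuel out rest
    | some k =>
      if k.toList.isEmpty then out
      else
        pvStep d fuel out
          (Sum.inl (seg.take (PySem.Chars.find seg k.toList).toNat)
            :: Sum.inr k
            :: Sum.inl (seg.drop ((PySem.Chars.find seg k.toList).toNat + k.toList.length))
            :: rest)

def find_wordy_expression_alt (one_sentence : String) (wordy_expression_dict : List (String × List String)) : List String :=
  pvStep wordy_expression_dict (4 * one_sentence.toList.length + 3) [] [Sum.inl one_sentence.toList]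

-- ===== PRECONDITION & SPEC =====
-- Pre_ excludes dicts containing an empty-string key: there Python A always raises
-- ValueError ('empty separator' from str.split), and B raises the same way from
-- str.partition; A returns normally on every other input.
def Pre_find_wordy_expression (one_sentence : String) (wordy_expression_dict : List (String × List String)) : Prop :=
  ∀ e ∈ wordy_expression_dict, e.1 ≠ ""
instance (one_sentence : String) (wordy_expression_dict : List (String × List String)) : Decidable (Pre_find_wordy_expression one_sentence wordy_expression_dict) := by unfold Pre_find_wordy_expression; infer_instance
def pvWitness_find_wordy_expression : String × (List (String × List String)) :=
  ("it is in order to be able to go", [("in order to", ["to"]), ("be able to", ["can"])])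
def Spec_find_wordy_expression (one_sentence : String) (wordy_expression_dict : List (String × List String)) (out : List String) : Prop := out = find_wordy_expression_alt one_sentence wordy_expression_dict
instance (one_sentence : String) (wordy_expression_dict : List (String × List String)) (out : List String) : Decidable (Spec_find_wordy_expression one_sentence wordy_expression_dict out) := by unfold Spec_find_wordy_expression; infer_instance

-- ===== CLAIM (what is proved, stated in full; the proofs are below) =====
def Claim_equal_find_wordy_expression : Prop := ∀ (one_sentence : String) (wordy_expression_dict : List (String × List String)), Dom_find_wordy_expression one_sentence wordy_expression_dict → Pre_find_wordy_expression one_sentence wordy_expression_dict → Spec_find_wordy_expression one_sentence wordy_expression_dict (find_wordy_expression one_sentence wordy_expression_dict)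

-- ===== LEMMAS AND PROOFS =====

-- pvRecB: a proof-side recursive specification (partition at the first occurrence
-- of the first present key and recurse on the two sides); the proofs show that
-- both the port of A and the stack machine of port B compute pvRecB.
def pvLoopB (F : List Char → List String) (keys : List (String × List String))
    (s : List Char) : List String :=
  match keys with
  | [] => []
  | (k, _) :: rest =>
    if PySem.Chars.isIn k.toList s then
      if k.toList.isEmpty then []
      else
        F (s.take (PySem.Chars.find s k.toList).toNat)
          ++ k :: F (s.drop ((PySem.Chars.find s k.toList).toNat + k.toList.length))
    else pvLoopB F rest s

def pvRecB (d : List (String × List String)) (fuel : Nat) (s : List Char) : List String :=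
  match fuel with
  | 0 => []
  | fuel + 1 => pvLoopB (fun p => pvRecB d fuel p) d s

-- pvSp: a fuel-free model of PySem.Chars.splitOn, used only by the proofs below
def pvSp (sep : List Char) (l : List Char) : List (List Char) :=
  match l with
  | [] => [[]]
  | c :: rest =>
    if h : sep.isPrefixOf (c :: rest) = true ∧ sep ≠ [] then
      [] :: pvSp sep ((c :: rest).drop sep.length)
    else
      (pvSp sep rest).modifyHead (c :: ·)
termination_by l.length
decreasing_by
  · simp only [List.length_drop, List.length_cons]
    have : 0 < sep.length := List.length_pos_iff.mpr h.2
    omega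
  · simp
theorem pvSp_ne_nil (sep l : List Char) : pvSp sep l ≠ [] := by
  induction l using pvSp.induct sep with
  | case1 => simp [pvSp]
  | case2 c rest h ih => simp [pvSp, h]
  | case3 c rest h ih =>
    rw [pvSp]; simp only [h, dif_neg]
    intro hc
    exact ih (by simpa using List.modifyHead_eq_nil_iff.mp hc)

theorem pv_go_eq' (sep : List Char) (hsep : sep ≠ []) (fuel : Nat) :
    ∀ (l cur : List Char) (acc : List (List Char)), l.length < fuel →
      PySem.Chars.splitOn.go sep fuel l cur acc
        = acc.reverse ++ (pvSp sep l).modifyHead (cur.reverse ++ ·) := by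
  induction fuel with
  | zero => intro l cur acc h; omega
  | succ f ih =>
    intro l cur acc h
    match l with
    | [] => simp [PySem.Chars.splitOn.go, pvSp]
    | c :: rest =>
      rw [PySem.Chars.splitOn.go]
      by_cases hp : sep.isPrefixOf (c :: rest) = true
      · rw [if_pos hp, ih _ _ _ (by
          simp only [List.length_drop, List.length_cons]
          have : 0 < sep.length := List.length_pos_iff.mpr hsep
          simp at h; omega)]
        rw [pvSp]; rw [dif_pos ⟨hp, hsep⟩]
        simp
        rcases pvSp sep (List.drop sep.length (c :: rest)) with _ | ⟨a, b⟩ <;> simp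
      · rw [if_neg hp, ih _ _ _ (by simp at h ⊢; omega)]
        rw [pvSp]; rw [dif_neg (by simp [hp])]
        rcases hsp : pvSp sep rest with _ | ⟨hd, tl⟩
        · exact absurd hsp (pvSp_ne_nil sep rest)
        · simp

theorem pv_splitOn_eq (s sep : List Char) (hsep : sep ≠ []) :
    PySem.Chars.splitOn s sep = pvSp sep s := by
  rw [PySem.Chars.splitOn, pv_go_eq' sep hsep _ _ _ _ (by omega)]
  rcases hsp : pvSp sep s with _ | ⟨hd, tl⟩
  · exact absurd hsp (pvSp_ne_nil sep s)
  · simp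

theorem pvSp_of_not_infix (sep l : List Char) (hsep : sep ≠ []) (h : ¬ sep <:+: l) :
    pvSp sep l = [l] := by
  induction l using pvSp.induct sep with
  | case1 => rw [pvSp]
  | case2 c rest hp ih =>
    exact absurd (List.isPrefixOf_iff_prefix.mp hp.1).isInfix h
  | case3 c rest hp ih =>
    rw [pvSp, dif_neg hp]
    rw [ih (fun hi => h (List.infix_cons_iff.mpr (Or.inr hi)))]
    rfl

theorem pv_find_eq (l sep : List Char) (j : Nat) (hpre : sep <+: l.drop j)
    (hmin : ∀ i < j, ¬ sep <+: l.drop i) : PySem.Chars.find l sep = (j : Int) := by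
  have hinf : sep <:+: l := hpre.isInfix.trans (List.drop_suffix j l).isInfix
  have h0 : 0 ≤ PySem.Chars.find l sep := (PySem.Chars.find_nonneg_iff l sep).mpr hinf
  obtain ⟨hat, hlt⟩ := PySem.Chars.find_spec h0
  rcases Nat.lt_trichotomy (PySem.Chars.find l sep).toNat j with h | h | h
  · exact absurd hat (hmin _ h)
  · omega
  · exact absurd hpre (hlt j h)

theorem pvSp_of_infix (sep l : List Char) (hsep : sep ≠ []) (h : sep <:+: l) :
    pvSp sep l = l.take (PySem.Chars.find l sep).toNat
      :: pvSp sep (l.drop ((PySem.Chars.find l sep).toNat + sep.length)) := by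
  induction l using pvSp.induct sep with
  | case1 =>
    rw [List.infix_nil] at h
    exact absurd h hsep
  | case2 c rest hp ih =>
    have hfind : PySem.Chars.find (c :: rest) sep = (0 : Int) := by
      refine pv_find_eq _ _ 0 ?_ (by omega)
      simpa using List.isPrefixOf_iff_prefix.mp hp.1
    rw [pvSp, dif_pos hp, hfind]
    simp
  | case3 c rest hp ih =>
    have hnpre : ¬ sep <+: (c :: rest) := by
      intro hh
      exact hp ⟨List.isPrefixOf_iff_prefix.mpr hh, hsep⟩
    have hrest : sep <:+: rest := (List.infix_cons_iff.mp h).resolve_left hnpre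
    have h0 : 0 ≤ PySem.Chars.find rest sep := (PySem.Chars.find_nonneg_iff rest sep).mpr hrest
    obtain ⟨hat, hlt⟩ := PySem.Chars.find_spec h0
    have hfind : PySem.Chars.find (c :: rest) sep
        = ((PySem.Chars.find rest sep).toNat + 1 : Nat) := by
      refine pv_find_eq _ _ _ ?_ ?_
      · simpa using hat
      · intro i hi
        match i with
        | 0 => simpa using hnpre
        | i + 1 =>
          simp only [List.drop_succ_cons]
          exact hlt i (by omega)
    rw [pvSp, dif_neg hp, ih hrest, hfind]
    have h1 : ((((PySem.Chars.find rest sep).toNat + 1 : Nat) : Int)).toNat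
        = (PySem.Chars.find rest sep).toNat + 1 := by omega
    rw [h1, List.take_succ_cons, Nat.add_right_comm, List.drop_succ_cons]
    rfl

theorem pv_find_add_le (l sep : List Char) (h : sep <:+: l) :
    (PySem.Chars.find l sep).toNat + sep.length ≤ l.length := by
  have h0 : 0 ≤ PySem.Chars.find l sep := (PySem.Chars.find_nonneg_iff l sep).mpr h
  obtain ⟨hat, -⟩ := PySem.Chars.find_spec h0
  have h2 := hat.length_le
  rw [List.length_drop] at h2
  have h3 := PySem.Chars.find_le_length l sep
  omega

theorem pvSp_frag_lt (sep : List Char) (hsep : sep ≠ []) :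
    ∀ (l : List Char), sep <:+: l → ∀ p ∈ pvSp sep l, p.length < l.length := by
  intro l
  induction hn : l.length using Nat.strong_induction_on generalizing l with
  | _ n ih =>
    intro h p hp
    have hsl : 0 < sep.length := List.length_pos_iff.mpr hsep
    have hle := pv_find_add_le l sep h
    rw [pvSp_of_infix sep l hsep h] at hp
    rcases List.mem_cons.mp hp with rfl | hp
    · simp; omega
    · set r := l.drop ((PySem.Chars.find l sep).toNat + sep.length) with hr
      have hrlen : r.length = l.length - ((PySem.Chars.find l sep).toNat + sep.length) := by
        simp [hr]
      by_cases hir : sep <:+: r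
      · have := ih r.length (by omega) r rfl hir p hp
        omega
      · rw [pvSp_of_not_infix sep r hsep hir] at hp
        simp at hp
        subst hp
        omega

theorem pvSp_len_gt_one (sep l : List Char) (hsep : sep ≠ []) :
    1 < (pvSp sep l).length ↔ sep <:+: l := by
  constructor
  · intro h
    by_contra hni
    rw [pvSp_of_not_infix sep l hsep hni] at h
    simp at h
  · intro h
    rw [pvSp_of_infix sep l hsep h]
    have := pvSp_ne_nil sep (l.drop ((PySem.Chars.find l sep).toNat + sep.length))
    simp [List.length_pos_iff.mpr this]

-- unfolding the key loop of port A, branch by branch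
theorem pvLoopA_empty (F : List Char → List String) (k : String) (v : List String)
    (rest : List (String × List String)) (s : List Char) (hk : k.toList = []) :
    pvLoopA F ((k, v) :: rest) s = [] := by
  have hsplit : PySem.Chars.split? s k.toList = none := by
    rw [PySem.Chars.split?, if_pos (by simp [hk])]
  rw [pvLoopA]
  simp only [hsplit]

theorem pvLoopA_skip (F : List Char → List String) (k : String) (v : List String)
    (rest : List (String × List String)) (s : List Char)
    (hk : k.toList ≠ []) (hni : ¬ k.toList <:+: s) :
    pvLoopA F ((k, v) :: rest) s = pvLoopA F rest s := by
  have hsplit : PySem.Chars.split? s k.toList = some [s] := by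
    rw [PySem.Chars.split?, if_neg (by simpa using hk), pv_splitOn_eq s k.toList hk,
      pvSp_of_not_infix k.toList s hk hni]
  rw [pvLoopA]
  simp only [hsplit]
  rw [if_neg (by simp)]

theorem pvLoopA_match (F : List Char → List String) (k : String) (v : List String)
    (rest : List (String × List String)) (s : List Char)
    (hk : k.toList ≠ []) (hin : k.toList <:+: s) :
    pvLoopA F ((k, v) :: rest) s = List.intercalate [k] ((pvSp k.toList s).map F) := by
  have hsplit : PySem.Chars.split? s k.toList = some (pvSp k.toList s) := by
    rw [PySem.Chars.split?, if_neg (by simpa using hk), pv_splitOn_eq s k.toList hk]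
  rw [pvLoopA]
  simp only [hsplit]
  rw [if_pos ((pvSp_len_gt_one k.toList s hk).mpr hin)]

theorem pvLoopA_scan (F : List Char → List String) (s : List Char) :
    ∀ (before keys : List (String × List String)),
      (∀ e ∈ before, e.1.toList ≠ [] ∧ ¬ e.1.toList <:+: s) →
      pvLoopA F (before ++ keys) s = pvLoopA F keys s := by
  intro before
  induction before with
  | nil => intro keys _; rfl
  | cons e before ih =>
    intro keys hb
    obtain ⟨hk, hni⟩ := hb e (by simp)
    rw [List.cons_append, ← Prod.mk.eta (p := e), pvLoopA_skip F e.1 e.2 _ s hk hni]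
    exact ih keys (fun e' he' => hb e' (by simp [he']))

-- unfolding the key loop of the spec pvRecB, branch by branch
theorem pvLoopB_empty (F : List Char → List String) (k : String) (v : List String)
    (rest : List (String × List String)) (s : List Char) (hk : k.toList = []) :
    pvLoopB F ((k, v) :: rest) s = [] := by
  rw [pvLoopB, if_pos (by rw [hk]; exact PySem.Chars.isIn_nil s), if_pos (by simp [hk])]

theorem pvLoopB_skip (F : List Char → List String) (k : String) (v : List String)
    (rest : List (String × List String)) (s : List Char) (hni : ¬ k.toList <:+: s) :
    pvLoopB F ((k, v) :: rest) s = pvLoopB F rest s := by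
  rw [pvLoopB, if_neg (by rw [PySem.Chars.isIn_iff_infix]; exact hni)]

theorem pvLoopB_match (F : List Char → List String) (k : String) (v : List String)
    (rest : List (String × List String)) (s : List Char)
    (hk : k.toList ≠ []) (hin : k.toList <:+: s) :
    pvLoopB F ((k, v) :: rest) s
      = F (s.take (PySem.Chars.find s k.toList).toNat)
        ++ k :: F (s.drop ((PySem.Chars.find s k.toList).toNat + k.toList.length)) := by
  rw [pvLoopB, if_pos ((PySem.Chars.isIn_iff_infix k.toList s).mpr hin),
    if_neg (by simpa using hk)]

-- two recursion functions agreeing on all strings shorter than s give the same loop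
theorem pvLoopA_congr (F F' : List Char → List String) (s : List Char)
    (hF : ∀ p : List Char, p.length < s.length → F p = F' p) :
    ∀ keys : List (String × List String), pvLoopA F keys s = pvLoopA F' keys s := by
  intro keys
  induction keys with
  | nil => rfl
  | cons e rest ih =>
    obtain ⟨k, v⟩ := e
    rw [pvLoopA, pvLoopA]
    rcases hsplit : PySem.Chars.split? s k.toList with _ | parts
    · simp only
    · simp only
      by_cases hgt : 1 < parts.length
      · rw [if_pos hgt, if_pos hgt]
        have hsep : k.toList ≠ [] := by
          intro hc
          rw [PySem.Chars.split?, if_pos (by simp [hc])] at hsplit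
          exact absurd hsplit (by simp)
        have hparts : parts = pvSp k.toList s := by
          rw [PySem.Chars.split?, if_neg (by simpa using hsep),
            pv_splitOn_eq s k.toList hsep] at hsplit
          injection hsplit with h; exact h.symm
        have hinf : k.toList <:+: s := by
          rw [← pvSp_len_gt_one k.toList s hsep, ← hparts]
          exact hgt
        refine congrArg _ (List.map_congr_left ?_)
        intro p hp
        exact hF p (pvSp_frag_lt k.toList hsep s hinf p (by rw [← hparts]; exact hp))
      · rw [if_neg hgt, if_neg hgt]
        exact ih

-- the fuel is irrelevant once it exceeds the sentence length
theorem pvFweA_fuel (d : List (String × List String)) :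
    ∀ (f1 f2 : Nat) (s : List Char), s.length < f1 → s.length < f2 →
      pvFweA d f1 s = pvFweA d f2 s := by
  intro f1
  induction f1 with
  | zero => intro f2 s h1 _; omega
  | succ a ih =>
    intro f2 s h1 h2
    match f2 with
    | 0 => omega
    | b + 1 =>
      rw [pvFweA, pvFweA]
      exact pvLoopA_congr _ _ s (fun p hp => ih b p (by omega) (by omega)) d

-- A's port equals the recursive spec pvRecB (with adequate fuel on both sides)
theorem pvFwe_eq (d : List (String × List String)) :
    ∀ (fA fB : Nat) (s : List Char), s.length < fA → s.length < fB →
      pvFweA d fA s = pvRecB d fB s := by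
  intro fA
  induction fA with
  | zero => intro fB s h1 _; omega
  | succ a ih =>
    intro fB s h1 h2
    match fB with
    | 0 => omega
    | b + 1 =>
      rw [pvFweA, pvRecB]
      suffices hgen : ∀ (keys before : List (String × List String)),
          d = before ++ keys →
          (∀ e ∈ before, e.1.toList ≠ [] ∧ ¬ e.1.toList <:+: s) →
          pvLoopA (fun p => pvFweA d a p) keys s = pvLoopB (fun p => pvRecB d b p) keys s by
        exact hgen d [] rfl (by simp)
      intro keys
      induction keys with
      | nil => intro before _ _; rfl
      | cons e rest ihk =>
        obtain ⟨k, v⟩ := e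
        intro before hd hb
        by_cases hk : k.toList = []
        · rw [pvLoopA_empty _ k v rest s hk, pvLoopB_empty _ k v rest s hk]
        · by_cases hin : k.toList <:+: s
          · -- matched key: both sides split at the first occurrence
            have hsl : 0 < k.toList.length := List.length_pos_iff.mpr hk
            have hle := pv_find_add_le s k.toList hin
            have hjlt : (PySem.Chars.find s k.toList).toNat < s.length := by omega
            have hrlt : (s.drop ((PySem.Chars.find s k.toList).toNat + k.toList.length)).length
                < s.length := by simp only [List.length_drop]; omega
            have htlt : (s.take (PySem.Chars.find s k.toList).toNat).length < s.length := by
              simp only [List.length_take]; omega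
            have ihL : pvFweA d a (s.take (PySem.Chars.find s k.toList).toNat)
                = pvRecB d b (s.take (PySem.Chars.find s k.toList).toNat) :=
              ih b _ (by omega) (by omega)
            have ihR : pvFweA d a (s.drop ((PySem.Chars.find s k.toList).toNat + k.toList.length))
                = pvRecB d b (s.drop ((PySem.Chars.find s k.toList).toNat + k.toList.length)) :=
              ih b _ (by omega) (by omega)
            have hbr : ∀ e ∈ before, e.1.toList ≠ []
                ∧ ¬ e.1.toList <:+: s.drop ((PySem.Chars.find s k.toList).toNat + k.toList.length) := by
              intro e he
              refine ⟨(hb e he).1, fun hc => (hb e he).2 ?_⟩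
              exact hc.trans (List.drop_suffix _ s).isInfix
            have htail : List.intercalate [k]
                ((pvSp k.toList (s.drop ((PySem.Chars.find s k.toList).toNat + k.toList.length))).map
                  (fun p => pvFweA d a p))
                = pvFweA d a (s.drop ((PySem.Chars.find s k.toList).toNat + k.toList.length)) := by
              by_cases hir : k.toList <:+:
                  s.drop ((PySem.Chars.find s k.toList).toNat + k.toList.length)
              · have hslen : 0 < s.length := by
                  have := hin.length_le
                  omega
                obtain ⟨a', rfl⟩ : ∃ a', a = a' + 1 := ⟨a - 1, by omega⟩
                have h5 : pvLoopA (fun p => pvFweA d a' p) d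
                      (s.drop ((PySem.Chars.find s k.toList).toNat + k.toList.length))
                    = pvLoopA (fun p => pvFweA d a' p) ((k, v) :: rest)
                      (s.drop ((PySem.Chars.find s k.toList).toNat + k.toList.length)) := by
                  rw [hd]
                  exact pvLoopA_scan _ _ before ((k, v) :: rest) hbr
                rw [show pvFweA d (a' + 1)
                      (s.drop ((PySem.Chars.find s k.toList).toNat + k.toList.length))
                    = pvLoopA (fun p => pvFweA d a' p) d
                      (s.drop ((PySem.Chars.find s k.toList).toNat + k.toList.length)) from by
                  rw [pvFweA]]
                rw [h5, pvLoopA_match _ k v rest _ hk hir]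
                refine congrArg _ (List.map_congr_left ?_)
                intro q hq
                have hql := pvSp_frag_lt k.toList hk _ hir q hq
                exact pvFweA_fuel d (a' + 1) a' q (by omega) (by omega)
              · rw [pvSp_of_not_infix k.toList _ hk hir]
                simp [List.intercalate]
            rw [pvLoopA_match _ k v rest s hk hin, pvLoopB_match _ k v rest s hk hin]
            rw [pvSp_of_infix k.toList s hk hin, List.map_cons]
            have hcons : ∀ (x : List String) (xs : List (List String)), xs ≠ [] →
                List.intercalate [k] (x :: xs) = x ++ [k] ++ List.intercalate [k] xs := by
              intro x xs hxs
              rcases xs with _ | ⟨y, t⟩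
              · exact absurd rfl hxs
              · simp [List.intercalate]
            rw [hcons _ _ (by
              intro hc
              exact pvSp_ne_nil k.toList _ (List.map_eq_nil_iff.mp hc))]
            rw [htail, ihL, ihR]
            simp
          · -- key absent: move on
            rw [pvLoopA_skip _ k v rest s hk hin, pvLoopB_skip _ k v rest s hin]
            exact ihk (before ++ [(k, v)]) (by simpa using hd)
              (by intro e he
                  rcases List.mem_append.mp he with h | h
                  · exact hb e h
                  · simp at h; subst h; exact ⟨hk, hin⟩)

-- the spec's fuel is also irrelevant once adequate
theorem pvRecB_fuel (d : List (String × List String)) (f1 f2 : Nat) (s : List Char)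
    (h1 : s.length < f1) (h2 : s.length < f2) : pvRecB d f1 s = pvRecB d f2 s := by
  rw [← pvFwe_eq d (s.length + 1) f1 s (by omega) h1,
    pvFwe_eq d (s.length + 1) f2 s (by omega) h2]

-- pvFirstKey characterisations
theorem pvFirstKey_none (keys : List (String × List String)) (s : List Char)
    (h : pvFirstKey keys s = none) : ∀ e ∈ keys, ¬ e.1.toList <:+: s := by
  induction keys with
  | nil => intro e he; simp at he
  | cons e rest ih =>
    obtain ⟨k, v⟩ := e
    rw [pvFirstKey] at h
    by_cases hin : PySem.Chars.isIn k.toList s = true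
    · rw [if_pos hin] at h; exact absurd h (by simp)
    · rw [if_neg hin] at h
      intro e' he'
      rcases List.mem_cons.mp he' with rfl | he'
      · simpa [PySem.Chars.isIn_iff_infix] using hin
      · exact ih h e' he'

theorem pvFirstKey_some (keys : List (String × List String)) (s : List Char) (k : String)
    (h : pvFirstKey keys s = some k) :
    ∃ before v rest, keys = before ++ (k, v) :: rest
      ∧ (∀ e ∈ before, ¬ e.1.toList <:+: s) ∧ k.toList <:+: s := by
  induction keys with
  | nil => exact absurd h (by simp [pvFirstKey])
  | cons e rest ih =>
    obtain ⟨k', v'⟩ := e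
    rw [pvFirstKey] at h
    by_cases hin : PySem.Chars.isIn k'.toList s = true
    · rw [if_pos hin] at h
      injection h with h; subst h
      exact ⟨[], v', rest, rfl, by simp, (PySem.Chars.isIn_iff_infix _ _).mp hin⟩
    · rw [if_neg hin] at h
      obtain ⟨before, v, rest', heq, hb, hk⟩ := ih h
      refine ⟨(k', v') :: before, v, rest', by simp [heq], ?_, hk⟩
      intro e he
      rcases List.mem_cons.mp he with rfl | he
      · simpa [PySem.Chars.isIn_iff_infix] using hin
      · exact hb e he

theorem pvLoopB_all_skip (F : List Char → List String) (s : List Char) :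
    ∀ keys : List (String × List String),
      (∀ e ∈ keys, ¬ e.1.toList <:+: s) → pvLoopB F keys s = [] := by
  intro keys
  induction keys with
  | nil => intro _; rfl
  | cons e rest ih =>
    intro h
    rw [← Prod.mk.eta (p := e), pvLoopB_skip F e.1 e.2 rest s (h e (by simp))]
    exact ih (fun e' he' => h e' (by simp [he']))

theorem pvLoopB_scan (F : List Char → List String) (s : List Char) :
    ∀ (before keys : List (String × List String)),
      (∀ e ∈ before, ¬ e.1.toList <:+: s) →
      pvLoopB F (before ++ keys) s = pvLoopB F keys s := by
  intro before
  induction before with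
  | nil => intro keys _; rfl
  | cons e before ih =>
    intro keys hb
    rw [List.cons_append, ← Prod.mk.eta (p := e),
      pvLoopB_skip F e.1 e.2 _ s (hb e (by simp))]
    exact ih keys (fun e' he' => hb e' (by simp [he']))

-- denotation and measure of a stack item, for the machine invariant
def pvDen (d : List (String × List String)) : List Char ⊕ String → List String
  | Sum.inl seg => pvRecB d (seg.length + 1) seg
  | Sum.inr k => [k]

def pvMeas : List Char ⊕ String → Nat
  | Sum.inl seg => 4 * seg.length + 2
  | Sum.inr _ => 1

-- the machine invariant: with fuel above the total measure, pvStep appends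
-- exactly the denotations of the remaining stack items to the output
theorem pvStep_eq (d : List (String × List String)) (hpre : ∀ e ∈ d, e.1 ≠ "") :
    ∀ (fuel : Nat) (out : List String) (stack : List (List Char ⊕ String)),
      (stack.map pvMeas).sum < fuel →
      pvStep d fuel out stack = out ++ stack.flatMap (pvDen d) := by
  intro fuel
  induction fuel with
  | zero => intro out stack h; omega
  | succ f ih =>
    intro out stack h
    match stack with
    | [] => simp [pvStep]
    | Sum.inr k :: rest =>
      rw [pvStep, ih (out ++ [k]) rest (by simp [pvMeas] at h ⊢; omega)]
      simp [pvDen]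
    | Sum.inl seg :: rest =>
      rw [pvStep]
      rcases hfk : pvFirstKey d seg with _ | k
      · simp only
        rw [ih out rest (by simp [pvMeas] at h ⊢; omega)]
        have hden : pvDen d (Sum.inl seg) = [] := by
          rw [pvDen, pvRecB]
          exact pvLoopB_all_skip _ seg d (pvFirstKey_none d seg hfk)
        simp [hden]
      · simp only
        obtain ⟨before, v, rest', heq, hb, hin⟩ := pvFirstKey_some d seg k hfk
        have hk : k.toList ≠ [] := by
          intro hc
          have hk' : k ≠ "" := hpre (k, v) (by rw [heq]; simp)
          exact hk' (String.toList_eq_nil_iff.mp hc)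
        rw [if_neg (by simpa using hk)]
        have hsl : 0 < k.toList.length := List.length_pos_iff.mpr hk
        have hle := pv_find_add_le seg k.toList hin
        set i := (PySem.Chars.find seg k.toList).toNat with hi
        have hmeas : ((Sum.inl (seg.take i) :: Sum.inr k
              :: Sum.inl (seg.drop (i + k.toList.length)) :: rest).map pvMeas).sum < f := by
          simp only [List.map_cons, List.sum_cons, pvMeas, List.length_take,
            List.length_drop] at h ⊢
          omega
        have hden : pvDen d (Sum.inl seg)
            = pvDen d (Sum.inl (seg.take i)) ++ k
              :: pvDen d (Sum.inl (seg.drop (i + k.toList.length))) := by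
          simp only [pvDen]
          rw [pvRecB]
          have hscan : pvLoopB (fun p => pvRecB d seg.length p) d seg
              = pvLoopB (fun p => pvRecB d seg.length p) ((k, v) :: rest') seg := by
            rw [heq]; exact pvLoopB_scan _ seg before _ hb
          rw [hscan, pvLoopB_match _ k v rest' seg hk hin, ← hi]
          have hlt : (seg.take i).length < seg.length ∧ (seg.drop (i + k.toList.length)).length < seg.length := by
            constructor
            · simp only [List.length_take]; omega
            · simp only [List.length_drop]; omega
          rw [pvRecB_fuel d seg.length ((seg.take i).length + 1) (seg.take i) (by omega) (by omega),
            pvRecB_fuel d seg.length ((seg.drop (i + k.toList.length)).length + 1) _ (by omega) (by omega)]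
        rw [ih out _ hmeas, List.flatMap_cons, List.flatMap_cons, List.flatMap_cons,
          List.flatMap_cons, hden]
        simp [pvDen]

-- ===== VERDICT (by name: the statement is the Claim_ definition above) =====
theorem find_wordy_expression_spec : Claim_equal_find_wordy_expression := by
  intro s d _ hpre
  unfold Spec_find_wordy_expression find_wordy_expression find_wordy_expression_alt
  rw [pvStep_eq d hpre _ [] _ (by simp [pvMeas])]
  simp only [List.nil_append, List.flatMap_cons, List.flatMap_nil, List.append_nil, pvDen]
  exact pvFwe_eq d _ _ s.toList (by omega) (by omega)
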